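-- pv_equiv track=rewrite | github.com/Vechno-Byhoi/Pitoniwe | 1.py | f
-- ===== SOURCE A (Python) =====
-- def f(lst, m):
--  tmp, res = [], []
--  for x in lst:
--      rem = x % m
--      for y in lst:
--             if (y % m == rem):
--              tmp.append(y)
--      res.append(tmp[:])
--      tmp.clear()
--
--  for x in res:
--      if x not in tmp:
--          tmp.append(x)
--  return tmp
-- ===== SOURCE B (Python) =====
-- def f(lst, m):
--     groups = {}
--     for x in lst:
--         groups.setdefault(x % m, []).append(x)
--     return list(groups.values())
-- ===== Notes on version B (the rewrite author's own statement) =====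
-- stated objective: faster
-- what changed: One pass building a remainder->group dict in first-appearance order replaces A's per-element rescans of the whole list plus a quadratic list-of-lists dedup.
import Mathlib
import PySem

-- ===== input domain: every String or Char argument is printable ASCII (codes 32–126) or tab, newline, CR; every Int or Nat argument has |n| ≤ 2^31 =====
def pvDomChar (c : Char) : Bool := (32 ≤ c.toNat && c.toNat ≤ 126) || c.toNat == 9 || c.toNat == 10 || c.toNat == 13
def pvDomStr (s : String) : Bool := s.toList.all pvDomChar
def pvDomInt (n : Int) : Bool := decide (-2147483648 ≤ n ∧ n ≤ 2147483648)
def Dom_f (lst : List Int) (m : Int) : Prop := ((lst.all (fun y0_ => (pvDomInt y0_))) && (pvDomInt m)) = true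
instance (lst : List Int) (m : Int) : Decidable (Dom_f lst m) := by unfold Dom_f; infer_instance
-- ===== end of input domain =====

-- B groups in ONE pass over the list with a remainder->group dict (first-appearance order),
-- instead of A's full rescan per element plus a list-of-lists dedup pass.

-- ===== PORT A =====
def f (lst : List Int) (m : Int) : List (List Int) :=
  let res := lst.foldl (fun res x =>
      let rem := PySem.Int.mod x m
      let tmp := lst.foldl (fun tmp y =>
          if PySem.Int.mod y m == rem then tmp ++ [y] else tmp) ([] : List Int)
      res ++ [tmp]) ([] : List (List Int))
  res.foldl (fun tmp x => if x ∈ tmp then tmp else tmp ++ [x]) []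

-- ===== PORT B =====
def f_alt (lst : List Int) (m : Int) : List (List Int) :=
  (lst.foldl (fun d x =>
      d.modify (PySem.Int.mod x m) [] (fun g => g ++ [x]))
    (PySem.Dict.empty : PySem.Dict Int (List Int))).values

-- ===== PRECONDITION & SPEC =====
-- Pre_ excludes m = 0, where Python's `x % m` raises ZeroDivisionError in both A and B.
def Pre_f (lst : List Int) (m : Int) : Prop := m ≠ 0
instance (lst : List Int) (m : Int) : Decidable (Pre_f lst m) := by unfold Pre_f; infer_instance
def pvWitness_f : List Int × Int := ([3, 5, 8, 1, 6], 3)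
def Spec_f (lst : List Int) (m : Int) (out : List (List Int)) : Prop := out = f_alt lst m
instance (lst : List Int) (m : Int) (out : List (List Int)) : Decidable (Spec_f lst m out) := by unfold Spec_f; infer_instance

-- ===== CLAIM (what is proved, stated in full; the proofs are below) =====
def Claim_equal_f : Prop := ∀ (lst : List Int) (m : Int), Dom_f lst m → Pre_f lst m → Spec_f lst m (f lst m)

-- ===== LEMMAS AND PROOFS =====

-- A's result in closed form: the group of each element, deduplicated in order.
theorem f_eq_ofList_map (lst : List Int) (m : Int) :
    f lst m = PySem.Set.ofList (lst.map (fun x =>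
      lst.filter (fun y => PySem.Int.mod y m == PySem.Int.mod x m))) := by
  unfold f
  rw [PySem.Set.ofList_eq_foldl]
  simp only [PySem.List.foldl_append_if_eq_filter, List.nil_append,
    PySem.List.foldl_append_singleton_eq_map]
  congr 1
  funext s x
  rw [PySem.Set.add_eq_ite]

-- ordered dedup commutes with an injective-on-the-list map
theorem ofList_map_of_injOn {α β : Type} [BEq α] [LawfulBEq α] [BEq β] [LawfulBEq β]
    (l : List α) (g : α → β)
    (h : ∀ a ∈ l, ∀ b ∈ l, g a = g b → a = b) :
    PySem.Set.ofList (l.map g) = (PySem.Set.ofList l).map g := by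
  induction l using List.reverseRecOn with
  | nil => simp [PySem.Set.ofList_nil]
  | append_singleton l a ih =>
    have h' : ∀ x ∈ l, ∀ y ∈ l, g x = g y → x = y := by
      intro x hx y hy
      exact h x (by simp [hx]) y (by simp [hy])
    rw [List.map_append, List.map_singleton, PySem.Set.ofList_append_singleton,
      PySem.Set.ofList_append_singleton, ih h']
    by_cases ha : a ∈ l
    · have hga : g a ∈ (PySem.Set.ofList l).map g := by
        simp only [List.mem_map]
        exact ⟨a, by simp [PySem.Set.mem_ofList, ha], rfl⟩
      rw [PySem.Set.add_of_mem hga, PySem.Set.add_of_mem (by simp [PySem.Set.mem_ofList, ha])]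
    · have hga : g a ∉ (PySem.Set.ofList l).map g := by
        simp only [List.mem_map, PySem.Set.mem_ofList]
        rintro ⟨b, hb, hgb⟩
        exact ha (h b (by simp [hb]) a (by simp) hgb ▸ hb)
      rw [PySem.Set.add_of_not_mem hga,
        PySem.Set.add_of_not_mem (by simp [PySem.Set.mem_ofList, ha]), List.map_append,
        List.map_singleton]

-- B's dict lookup in closed form
theorem f_alt_getD (lst : List Int) (m : Int) (r : Int) :
    (lst.foldl (fun d x => d.modify (PySem.Int.mod x m) [] (fun g => g ++ [x]))
      (PySem.Dict.empty : PySem.Dict Int (List Int))).getD r []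
    = lst.filter (fun y => PySem.Int.mod y m == r) := by
  have : lst.foldl (fun d x => d.modify (PySem.Int.mod x m) [] (fun g => g ++ [x]))
      (PySem.Dict.empty : PySem.Dict Int (List Int))
      = (lst.map (fun x => (PySem.Int.mod x m, x))).foldl
          (fun d p => d.modify p.1 [] (fun g => g ++ [p.2])) PySem.Dict.empty := by
    rw [List.foldl_map]
  rw [this, PySem.Dict.getD_foldl_modify_append]
  simp [List.filter_map, Function.comp_def, List.map_map]

-- B's result in closed form
theorem f_alt_eq (lst : List Int) (m : Int) :
    f_alt lst m = (PySem.Set.ofList (lst.map (fun x => PySem.Int.mod x m))).map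
      (fun r => lst.filter (fun y => PySem.Int.mod y m == r)) := by
  unfold f_alt
  rw [PySem.Dict.values_eq_map_keys _
    (PySem.Dict.nodup_keys_foldl_modify_key lst (fun x => PySem.Int.mod x m) []
      (fun d x g => g ++ [x]) _ PySem.Dict.nodup_keys_empty) [],
    PySem.Dict.keys_foldl_modify_key, PySem.Dict.keys_empty, PySem.Set.update_nil_left]
  exact List.map_congr_left (fun r _ => f_alt_getD lst m r)

-- ===== VERDICT (by name: the statement is the Claim_ definition above) =====
theorem f_spec : Claim_equal_f := by
  intro lst m _ _
  unfold Spec_f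
  rw [f_eq_ofList_map, f_alt_eq]
  have hmap : lst.map (fun x =>
      lst.filter (fun y => PySem.Int.mod y m == PySem.Int.mod x m))
      = (lst.map (fun x => PySem.Int.mod x m)).map
        (fun r => lst.filter (fun y => PySem.Int.mod y m == r)) := by
    rw [List.map_map]; rfl
  rw [hmap, ofList_map_of_injOn]
  intro a ha b hb hab
  simp only [List.mem_map] at ha hb
  obtain ⟨x, hx, rfl⟩ := ha
  have hxa : x ∈ lst.filter (fun y => PySem.Int.mod y m == PySem.Int.mod x m) := by
    simp [List.mem_filter, hx]
  rw [hab] at hxa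
  simp only [List.mem_filter, beq_iff_eq] at hxa
  exact hxa.2
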